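-- pv_equiv track=rewrite | github.com/yantavares/simulador-redes-TR1 | transmissor.py | character_count_framing
-- ===== SOURCE A (Python) =====
-- def character_count_framing(bits_array, max_frame_size): # limit of max_frame_size is 256
--     """Return a matrix of frames, each frame is a list of strings of 8 bits"""
--     frames_matrix = []
--     bytes_list = [''.join(map(str, bits_array[i:i+8])) for i in range(0, len(bits_array), 8)] # bytes list is a array of strings of 8 bits
--
--     while bytes_list:
--         frame_size = min(len(bytes_list), max_frame_size - 1)
--         frame = [f"{frame_size+1:08b}"] + bytes_list[:frame_size] # +1 for the header, because the header matter in the frame size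
--         frames_matrix.append(frame)
--         bytes_list = bytes_list[frame_size:]
--
--     return frames_matrix
-- ===== SOURCE B (Python) =====
-- def character_count_framing(bits_array, max_frame_size):
--     """One pass over the raw bit array: slice bits_per_frame bits per frame and
--     chunk each slice into 8-bit byte strings, instead of building the full
--     bytes_list and repeatedly re-slicing a shrinking list."""
--     bits_per_frame = 8 * (max_frame_size - 1)
--     frames_matrix = []
--     i = 0
--     while i < len(bits_array):
--         chunk = bits_array[i:i + bits_per_frame]
--         byte_strs = [''.join(map(str, chunk[j:j + 8])) for j in range(0, len(chunk), 8)]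
--         frames_matrix.append([format(len(byte_strs) + 1, '08b')] + byte_strs)
--         i += bits_per_frame
--     return frames_matrix
-- ===== Notes on version B (the rewrite author's own statement) =====
-- stated objective: alternative
-- what changed: B drops A's intermediate full bytes_list and its repeated re-slicing of a shrinking list: it walks the raw bit array once in steps of bits_per_frame = 8*(max_frame_size-1), chunking each bit slice into its 8-bit byte strings directly.
import Mathlib
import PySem

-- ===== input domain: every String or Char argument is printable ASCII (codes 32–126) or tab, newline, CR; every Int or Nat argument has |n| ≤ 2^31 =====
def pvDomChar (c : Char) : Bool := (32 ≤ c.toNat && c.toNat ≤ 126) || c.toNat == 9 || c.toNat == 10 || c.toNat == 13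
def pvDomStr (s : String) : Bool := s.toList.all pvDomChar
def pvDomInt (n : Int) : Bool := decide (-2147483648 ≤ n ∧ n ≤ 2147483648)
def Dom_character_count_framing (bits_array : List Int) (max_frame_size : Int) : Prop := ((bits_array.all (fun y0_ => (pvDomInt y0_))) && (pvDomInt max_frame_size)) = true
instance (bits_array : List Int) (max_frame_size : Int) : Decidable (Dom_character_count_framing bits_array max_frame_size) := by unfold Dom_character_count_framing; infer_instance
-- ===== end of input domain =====

-- B re-decomposes the task: one pass over the raw bit array slicing bits_per_frame bits per
-- frame and chunking each slice into bytes, instead of A's full bytes_list that is repeatedly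
-- re-sliced while shrinking (objective: alternative decomposition, same cost).

-- ===== PORT A =====
-- f"{n:08b}": binary digits zero-padded (after the sign) to width 8; exact for Python's '08b'
def pvBin8 (n : Int) : String :=
  if n < 0 then
    String.ofList ('-' :: (List.replicate (8 - ((PySem.Int.toBinChars (-n)).length + 1)) '0'
      ++ PySem.Int.toBinChars (-n)))
  else
    String.ofList (List.replicate (8 - (PySem.Int.toBinChars n).length) '0'
      ++ PySem.Int.toBinChars n)

-- A's while loop over the shrinking bytes_list
def ccfLoop (bytes_list : List String) (max_frame_size : Int) : List (List String) :=
  if hbl : bytes_list = [] then []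
  else
    let frame_size : Int := min (PySem.List.len bytes_list) (max_frame_size - 1)
    if hfs : 1 ≤ frame_size then
      ([pvBin8 (frame_size + 1)] ++ PySem.List.slice bytes_list none (some frame_size))
        :: ccfLoop (PySem.List.slice bytes_list (some frame_size) none) max_frame_size
    else []  -- Python's while loop never terminates here (frame_size ≤ 0); totality guard, outside Pre_
termination_by bytes_list.length
decreasing_by
  have h0 : (0:Int) ≤ min (PySem.List.len bytes_list) (max_frame_size - 1) := by omega
  rw [PySem.List.slice_from _ h0]
  have hlen : 1 ≤ bytes_list.length := by
    cases bytes_list with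
    | nil => exact absurd rfl hbl
    | cons a l => simp
  simp only [List.length_drop]
  simp only [PySem.List.len_eq] at hfs ⊢
  omega

def character_count_framing (bits_array : List Int) (max_frame_size : Int) : List (List String) :=
  let bytes_list := (PySem.List.pyRange 0 (PySem.List.len bits_array) 8).map
    (fun i => PySem.Str.join "" ((PySem.List.slice bits_array (some i) (some (i + 8))).map PySem.Int.toStr))
  ccfLoop bytes_list max_frame_size

-- ===== PORT B =====
-- B's while loop: i steps through the raw bit array by bits_per_frame
def ccfAltLoop (bits : List Int) (bpf : Int) (i : Nat) : List (List String) :=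
  if hi : (i : Int) < PySem.List.len bits then
    if hb : 1 ≤ bpf then
      let chunk := PySem.List.slice bits (some (i : Int)) (some ((i : Int) + bpf))
      let byte_strs := (PySem.List.pyRange 0 (PySem.List.len chunk) 8).map
        (fun j => PySem.Str.join "" ((PySem.List.slice chunk (some j) (some (j + 8))).map PySem.Int.toStr))
      ([pvBin8 ((byte_strs.length : Int) + 1)] ++ byte_strs)
        :: ccfAltLoop bits bpf (i + bpf.toNat)
    else []  -- Python's while loop never terminates with a nonpositive step; totality guard, outside Pre_
  else []
termination_by bits.length - i
decreasing_by
  simp only [PySem.List.len_eq] at hi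
  omega

def character_count_framing_alt (bits_array : List Int) (max_frame_size : Int) : List (List String) :=
  ccfAltLoop bits_array (8 * (max_frame_size - 1)) 0

-- ===== PRECONDITION & SPEC =====
-- Pre_ excludes max_frame_size ≤ 1 together with a nonempty bits_array: there A's while loop
-- never terminates (frame_size ≤ 0 leaves bytes_list unchanged), so A returns no value.
def Pre_character_count_framing (bits_array : List Int) (max_frame_size : Int) : Prop :=
  bits_array = [] ∨ 2 ≤ max_frame_size
instance (bits_array : List Int) (max_frame_size : Int) : Decidable (Pre_character_count_framing bits_array max_frame_size) := by unfold Pre_character_count_framing; infer_instance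

def pvWitness_character_count_framing : List Int × Int := ([1, 0, 1, 1, 0, 1, 0, 0, 1], 3)

def Spec_character_count_framing (bits_array : List Int) (max_frame_size : Int) (out : List (List String)) : Prop := out = character_count_framing_alt bits_array max_frame_size
instance (bits_array : List Int) (max_frame_size : Int) (out : List (List String)) : Decidable (Spec_character_count_framing bits_array max_frame_size out) := by unfold Spec_character_count_framing; infer_instance

-- ===== CLAIM (what is proved, stated in full; the proofs are below) =====
def Claim_equal_character_count_framing : Prop := ∀ (bits_array : List Int) (max_frame_size : Int), Dom_character_count_framing bits_array max_frame_size → Pre_character_count_framing bits_array max_frame_size → Spec_character_count_framing bits_array max_frame_size (character_count_framing bits_array max_frame_size)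

-- ===== LEMMAS AND PROOFS =====

-- the byte string of one ≤8-bit chunk
def pvByteStr (ys : List Int) : String := PySem.Str.join "" (ys.map PySem.Int.toStr)

-- proof-side normal form: the list of byte strings of xs, 8 bits at a time
def pvBytes (xs : List Int) : List String :=
  if h : xs = [] then [] else pvByteStr (xs.take 8) :: pvBytes (xs.drop 8)
termination_by xs.length
decreasing_by
  cases xs with
  | nil => exact absurd rfl h
  | cons a l => simp

lemma pvBytes_nil : pvBytes [] = [] := by rw [pvBytes]; simp

lemma pvBytes_cons (xs : List Int) (h : xs ≠ []) :
    pvBytes xs = pvByteStr (xs.take 8) :: pvBytes (xs.drop 8) := by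
  rw [pvBytes]; simp [h]

lemma pvRange8_cons (a b : Int) (h : a < b) :
    PySem.List.pyRange a b 8 = a :: PySem.List.pyRange (a + 8) b 8 := by
  rw [PySem.List.pyRange_of_pos a b (by norm_num), PySem.List.pyRange_of_pos (a+8) b (by norm_num)]
  have hN : ((b - a + 8 - 1) / 8).toNat
      = (if a + 8 < b then ((b - (a + 8) + 8 - 1) / 8).toNat else 0) + 1 := by
    split_ifs <;> omega
  rw [if_pos h, hN, List.range_succ_eq_map, List.map_cons, List.map_map]
  congr 1
  · simp
  · apply List.map_congr_left
    intro k _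
    simp [Function.comp]
    ring

lemma pvRange8_nil (a b : Int) (h : b ≤ a) : PySem.List.pyRange a b 8 = [] := by
  rw [PySem.List.pyRange_of_pos a b (by norm_num), if_neg (by omega)]
  simp

-- the comprehension over range(0, len, 8) is pvBytes
lemma slice_shift (xs : List Int) (c a b : Int) (hc : 0 ≤ c) (ha : 0 ≤ a) (hab : a ≤ b) :
    PySem.List.slice xs (some (c + a)) (some (c + b))
      = PySem.List.slice (xs.drop c.toNat) (some a) (some b) := by
  rw [PySem.List.slice_toNat _ (by omega) (by omega), PySem.List.slice_toNat _ ha (by omega),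
    List.drop_drop]
  congr 1
  · omega
  · congr 1
    omega

lemma map_range8_eq_pvBytes_aux : ∀ (n : Nat) (xs : List Int), xs.length ≤ n →
    (PySem.List.pyRange 0 (PySem.List.len xs) 8).map
      (fun i => PySem.Str.join "" ((PySem.List.slice xs (some i) (some (i + 8))).map PySem.Int.toStr))
    = pvBytes xs := by
  intro n
  induction n with
  | zero =>
    intro xs hle
    have : xs = [] := List.eq_nil_of_length_eq_zero (by omega)
    subst this
    rw [pvRange8_nil _ _ (by simp [PySem.List.len_eq])]
    simp [pvBytes_nil]
  | succ n ih =>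
    intro xs hle
    by_cases hxs : xs = []
    · subst hxs
      rw [pvRange8_nil _ _ (by simp [PySem.List.len_eq])]
      simp [pvBytes_nil]
    · have hlen : 0 < xs.length := List.length_pos_of_ne_nil hxs
      rw [pvRange8_cons 0 _ (by simp [PySem.List.len_eq]; omega), List.map_cons,
        pvBytes_cons _ hxs]
      congr 1
      · -- head: xs[0:8] joined
        rw [show ((0 : Int) + 8) = 8 by norm_num,
          PySem.List.slice_toNat _ (by norm_num) (by norm_num)]
        simp [pvByteStr]
      · -- tail: shift the range by 8
        rw [show ((0 : Int) + 8) = 8 by norm_num]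
        have htail := ih (xs.drop 8) (by simp; omega)
        rw [← htail]
        rw [PySem.List.pyRange_of_pos 8 _ (by norm_num),
          PySem.List.pyRange_of_pos 0 _ (by norm_num)]
        have hNe : (if (8 : Int) < PySem.List.len xs then
              ((PySem.List.len xs - 8 + 8 - 1) / 8).toNat else 0)
            = (if (0 : Int) < PySem.List.len (xs.drop 8) then
              ((PySem.List.len (xs.drop 8) - 0 + 8 - 1) / 8).toNat else 0) := by
          simp only [PySem.List.len_eq, List.length_drop]
          split_ifs <;> omega
        rw [List.map_map, List.map_map, hNe]
        apply List.map_congr_left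
        intro k _
        simp only [Function.comp]
        have h1 : (8 : Int) + 8 * (k : Int) = 8 + 8 * k := rfl
        rw [show (8 : Int) + 8 * (k : Int) + 8 = 8 + (8 * k + 8) by ring,
          show (8 : Int) + 8 * (k : Int) = 8 + (8 * k : Int) by ring,
          slice_shift xs 8 (8 * k) (8 * k + 8) (by norm_num) (by positivity) (by omega)]
        simp

lemma map_range8_eq_pvBytes (xs : List Int) :
    (PySem.List.pyRange 0 (PySem.List.len xs) 8).map
      (fun i => PySem.Str.join "" ((PySem.List.slice xs (some i) (some (i + 8))).map PySem.Int.toStr))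
    = pvBytes xs :=
  map_range8_eq_pvBytes_aux xs.length xs le_rfl

lemma pvBytes_take (xs : List Int) (k : Nat) :
    pvBytes (xs.take (8 * k)) = (pvBytes xs).take k := by
  induction k generalizing xs with
  | zero => simp [pvBytes_nil]
  | succ k ih =>
    by_cases hxs : xs = []
    · subst hxs; simp [pvBytes_nil]
    · have h1 : xs.take (8 * (k + 1)) ≠ [] := by
        simp [List.take_eq_nil_iff, hxs]
      rw [pvBytes_cons _ h1, pvBytes_cons _ hxs, List.take_succ_cons]
      congr 1
      · congr 1
        rw [List.take_take]
        congr 1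
      · have h2 : (xs.take (8 * (k + 1))).drop 8 = (xs.drop 8).take (8 * k) := by
          rw [List.drop_take]
          congr 1
        rw [h2, ih]

lemma pvBytes_drop (xs : List Int) (k : Nat) :
    pvBytes (xs.drop (8 * k)) = (pvBytes xs).drop k := by
  induction k generalizing xs with
  | zero => simp
  | succ k ih =>
    by_cases hxs : xs = []
    · subst hxs; simp [pvBytes_nil]
    · rw [pvBytes_cons _ hxs, List.drop_succ_cons]
      have h2 : xs.drop (8 * (k + 1)) = (xs.drop 8).drop (8 * k) := by
        rw [List.drop_drop]
        congr 1
        omega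
      rw [h2, ih]

lemma take_min_length (bl : List String) (c : Nat) : bl.take (min bl.length c) = bl.take c := by
  rcases le_total bl.length c with h | h
  · rw [min_eq_left h, List.take_length, List.take_of_length_le h]
  · rw [min_eq_right h]

lemma drop_min_length (bl : List String) (c : Nat) : bl.drop (min bl.length c) = bl.drop c := by
  rcases le_total bl.length c with h | h
  · rw [min_eq_left h, List.drop_length, List.drop_eq_nil_of_le h]
  · rw [min_eq_right h]

lemma ccfLoop_step (bl : List String) (m : Int) (hbl : bl ≠ []) (hm : 2 ≤ m) :
    ccfLoop bl m =
      ([pvBin8 (((bl.take (m - 1).toNat).length : Int) + 1)] ++ bl.take (m - 1).toNat)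
        :: ccfLoop (bl.drop (m - 1).toNat) m := by
  have hL : 1 ≤ bl.length := List.length_pos_of_ne_nil hbl
  have hfs : (1 : Int) ≤ min (PySem.List.len bl) (m - 1) := by
    simp only [PySem.List.len_eq]; omega
  rw [ccfLoop, dif_neg hbl, dif_pos hfs]
  have hto : (min (PySem.List.len bl) (m - 1)).toNat = min bl.length (m - 1).toNat := by
    simp only [PySem.List.len_eq]; omega
  have hslice1 : PySem.List.slice bl none (some (min (PySem.List.len bl) (m - 1)))
      = bl.take (m - 1).toNat := by
    rw [PySem.List.slice_to _ (by omega), hto, take_min_length]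
  have hslice2 : PySem.List.slice bl (some (min (PySem.List.len bl) (m - 1))) none
      = bl.drop (m - 1).toNat := by
    rw [PySem.List.slice_from _ (by omega), hto, drop_min_length]
  have hhdr : min (PySem.List.len bl) (m - 1) + 1
      = ((bl.take (m - 1).toNat).length : Int) + 1 := by
    simp only [PySem.List.len_eq, List.length_take]
    omega
  rw [hslice1, hslice2, hhdr]

lemma ccfAltLoop_step (bits : List Int) (m : Int) (i : Nat) (hi : i < bits.length)
    (hm : 2 ≤ m) :
    ccfAltLoop bits (8 * (m - 1)) i =
      ([pvBin8 ((((pvBytes (bits.drop i)).take (m - 1).toNat).length : Int) + 1)]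
          ++ (pvBytes (bits.drop i)).take (m - 1).toNat)
        :: ccfAltLoop bits (8 * (m - 1)) (i + (8 * (m - 1)).toNat) := by
  have hbpf : (1 : Int) ≤ 8 * (m - 1) := by omega
  rw [ccfAltLoop, dif_pos (by simp only [PySem.List.len_eq]; omega), dif_pos hbpf]
  have hchunk : PySem.List.slice bits (some (i : Int)) (some ((i : Int) + 8 * (m - 1)))
      = (bits.drop i).take (8 * (m - 1).toNat) := by
    rw [PySem.List.slice_toNat _ (by omega) (by omega)]
    have h1 : ((i : Int) + 8 * (m - 1)).toNat - ((i : Int)).toNat = 8 * (m - 1).toNat := by omega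
    have h2 : ((i : Int)).toNat = i := by omega
    rw [h1, h2]
  simp only [hchunk, map_range8_eq_pvBytes, pvBytes_take]

lemma main_loop (m : Int) (hm : 2 ≤ m) :
    ∀ (n : Nat) (bits : List Int) (i : Nat), bits.length - i ≤ n →
      ccfAltLoop bits (8 * (m - 1)) i = ccfLoop (pvBytes (bits.drop i)) m := by
  intro n
  induction n with
  | zero =>
    intro bits i hle
    have hdrop : bits.drop i = [] := List.drop_eq_nil_of_le (by omega)
    rw [ccfAltLoop, dif_neg (by simp only [PySem.List.len_eq]; omega), hdrop, pvBytes_nil,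
      ccfLoop, dif_pos rfl]
  | succ n ih =>
    intro bits i hle
    by_cases hi : i < bits.length
    · have hrest : bits.drop i ≠ [] := by
        intro hcon
        have := congrArg List.length hcon
        simp at this
        omega
      rw [ccfAltLoop_step bits m i hi hm, ccfLoop_step _ m (by
          intro hcon
          rw [pvBytes] at hcon
          simp [hrest] at hcon) hm]
      congr 1
      have hdd : bits.drop (i + (8 * (m - 1)).toNat) = (bits.drop i).drop (8 * (m - 1).toNat) := by
        rw [List.drop_drop]
        congr 1
        omega
      rw [ih bits (i + (8 * (m - 1)).toNat) (by omega), hdd, pvBytes_drop]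
    · have hdrop : bits.drop i = [] := List.drop_eq_nil_of_le (by omega)
      rw [ccfAltLoop, dif_neg (by simp only [PySem.List.len_eq]; omega), hdrop, pvBytes_nil,
        ccfLoop, dif_pos rfl]

-- ===== VERDICT (by name: the statement is the Claim_ definition above) =====
theorem character_count_framing_spec : Claim_equal_character_count_framing := by
  intro bits m _ hpre
  unfold Spec_character_count_framing character_count_framing character_count_framing_alt
  rw [map_range8_eq_pvBytes]
  rcases hpre with h | h
  · subst h
    rw [ccfAltLoop, ccfLoop]
    simp [pvBytes_nil, PySem.List.len]
  · have := main_loop m h (bits.length) bits 0 (by omega)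
    simp only [List.drop_zero] at this
    exact this.symm
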